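-- pv_equiv track=rewrite | github.com/tomer-reiter/advent-of-code | 2023/puzzle_8.py | find_repeat_length
-- ===== SOURCE A (Python) =====
-- def traverse(graph, node, instructions, instruction_index):
--     instruction = instructions[instruction_index]
--     adjacent_nodes = graph[node]
--     new_node = adjacent_nodes[0] if instruction == "L" else adjacent_nodes[1]
--     return new_node, (instruction_index + 1) % len(instructions)
--
-- def find_repeat_length(graph, instructions, node):
--     instr_index, curr_node = 0, node
--     states_visited = {(node, 0): 0}
--     steps = 0
--     while True:
--         curr_node, instr_index = traverse(graph, curr_node, instructions, instr_index)
--         steps += 1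
--         current_state = (curr_node, instr_index)
--         if current_state in states_visited:
--             return steps - states_visited[current_state], steps
--         states_visited[current_state] = steps
-- ===== SOURCE B (Python) =====
-- def find_repeat_length(graph, instructions, node):
--     # Constant-memory re-implementation: instead of storing every visited state
--     # in a dict, rescan the walk from the start to find the first repeated state.
--     n = len(instructions)
--
--     def step(state):
--         cur, idx = state
--         adj = graph[cur]
--         nxt = adj[0] if instructions[idx] == "L" else adj[1]
--         return nxt, (idx + 1) % n
--
--     def walk(t):
--         s = (node, 0)
--         for _ in range(t):
--             s = step(s)
--         return s
--
--     t = 1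
--     while True:
--         st = walk(t)
--         for i in range(t):
--             if walk(i) == st:
--                 return t - i, t
--         t += 1
-- ===== Notes on version B (the rewrite author's own statement) =====
-- stated objective: alternative
-- what changed: Replaces A's single walk with a dict of all visited states by a constant-extra-memory double loop that, for each step count t, rescans the walk from the start to detect the first repeated state (trades the O(T) hash map for O(T^2) recomputation).
-- outside the precondition, e.g. on find_repeat_length({'A': ['A', 'A'], 'Z': ['Z']}, 'L', 'A'): A returns (1, 1), B returns (1, 1); on find_repeat_length({'A': ['B', 'A']}, 'R', 'A'): A returns (1, 1), B returns (1, 1)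
import Mathlib
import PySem

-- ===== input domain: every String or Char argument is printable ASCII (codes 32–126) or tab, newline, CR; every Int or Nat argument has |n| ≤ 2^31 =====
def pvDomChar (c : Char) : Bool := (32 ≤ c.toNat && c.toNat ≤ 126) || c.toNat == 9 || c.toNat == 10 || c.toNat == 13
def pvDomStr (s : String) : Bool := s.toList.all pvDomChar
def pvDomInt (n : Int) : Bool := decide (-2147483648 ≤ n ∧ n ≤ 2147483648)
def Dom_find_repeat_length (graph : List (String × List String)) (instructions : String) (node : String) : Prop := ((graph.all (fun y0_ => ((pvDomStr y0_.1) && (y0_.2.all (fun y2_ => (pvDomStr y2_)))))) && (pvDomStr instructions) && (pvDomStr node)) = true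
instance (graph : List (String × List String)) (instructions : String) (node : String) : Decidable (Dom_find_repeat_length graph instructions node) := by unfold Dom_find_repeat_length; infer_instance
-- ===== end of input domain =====

-- B replaces A's dict of visited states by a constant-extra-memory double loop that rescans
-- the walk to find the first repeated state (objective: alternative; no side effects in either).

-- ===== PORT A =====
-- Where Python A raises (IndexError / KeyError / ZeroDivisionError, excluded by Pre_) the
-- PySem primitives return none and the port takes a .getD default on that unreachable path.
def py_traverse (graph : List (String × List String)) (node : String)
    (instructions : String) (instruction_index : Int) : String × Int :=
  let instruction := (PySem.Str.pyGet? instructions instruction_index).getD ' '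
  let adjacent_nodes := (PySem.Dict.get? ⟨graph⟩ node).getD []
  let new_node := if instruction == 'L' then (PySem.List.pyGet? adjacent_nodes 0).getD ""
                  else (PySem.List.pyGet? adjacent_nodes 1).getD ""
  (new_node, PySem.Int.mod (instruction_index + 1) (PySem.Str.len instructions))

-- the 'while True' loop; the fuel only makes it total: under Pre_ a state repeats within
-- graph.length * |instructions| steps, so the fuel below is never exhausted.
def py_loop (graph : List (String × List String)) (instructions : String) :
    Nat → PySem.Dict (String × Int) Int → Int → String → Int → Int × Int
  | 0, _, _, _, _ => (0, 0)
  | fuel + 1, states_visited, steps, curr_node, instr_index =>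
    let current_state := py_traverse graph curr_node instructions instr_index
    let steps' := steps + 1
    match PySem.Dict.get? states_visited current_state with
    | some v => (steps' - v, steps')
    | none =>
      py_loop graph instructions fuel (states_visited.insert current_state steps') steps'
        current_state.1 current_state.2

def find_repeat_length (graph : List (String × List String)) (instructions : String) (node : String) : Int × Int :=
  py_loop graph instructions (graph.length * instructions.toList.length + 1)
    (PySem.Dict.mk [((node, 0), 0)]) 0 node 0

-- ===== PORT B =====
def alt_step (graph : List (String × List String)) (instructions : String) (n : Int)
    (state : String × Int) : String × Int :=
  let adj := (PySem.Dict.get? ⟨graph⟩ state.1).getD []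
  let nxt := if (PySem.Str.pyGet? instructions state.2).getD ' ' == 'L' then
               (PySem.List.pyGet? adj 0).getD ""
             else (PySem.List.pyGet? adj 1).getD ""
  (nxt, PySem.Int.mod (state.2 + 1) n)

def alt_walk (graph : List (String × List String)) (instructions : String) (n : Int)
    (node : String) : Nat → String × Int
  | 0 => (node, 0)
  | t + 1 => alt_step graph instructions n (alt_walk graph instructions n node t)

-- the 'while True' outer loop with its 'for i in range(t)' rescan; fuel as above.
def alt_outer (graph : List (String × List String)) (instructions : String) (n : Int)
    (node : String) : Nat → Nat → Int × Int
  | 0, _ => (0, 0)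
  | fuel + 1, t =>
    let st := alt_walk graph instructions n node t
    match (List.range t).find? (fun i => alt_walk graph instructions n node i == st) with
    | some i => ((t : Int) - (i : Int), (t : Int))
    | none => alt_outer graph instructions n node fuel (t + 1)

def find_repeat_length_alt (graph : List (String × List String)) (instructions : String) (node : String) : Int × Int :=
  alt_outer graph instructions (PySem.Str.len instructions) node
    (graph.length * instructions.toList.length + 1) 1

-- ===== PRECONDITION & SPEC =====
-- Pre_ is the natural domain: nonempty instructions and a closed graph (the start node is a
-- key, every adjacency list has ≥ 2 entries, all of them keys).  Outside it A raises
-- (IndexError / ZeroDivisionError on empty instructions, KeyError on a missing key) except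
-- for some inputs whose malformed part is unreachable from the start node; those are
-- excluded too because reachability is not a closed-form condition (see claim cites).
def Pre_find_repeat_length (graph : List (String × List String)) (instructions : String) (node : String) : Prop :=
  instructions ≠ "" ∧ node ∈ graph.map Prod.fst ∧
    ∀ p ∈ graph, 2 ≤ p.2.length ∧ ∀ a ∈ p.2, a ∈ graph.map Prod.fst

instance (graph : List (String × List String)) (instructions : String) (node : String) : Decidable (Pre_find_repeat_length graph instructions node) := by
  unfold Pre_find_repeat_length; infer_instance

def pvWitness_find_repeat_length : (List (String × List String)) × String × String :=
  ([("AAA", ["BBB", "AAA"]), ("BBB", ["AAA", "BBB"])], "LR", "AAA")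

def Spec_find_repeat_length (graph : List (String × List String)) (instructions : String) (node : String) (out : Int × Int) : Prop := out = find_repeat_length_alt graph instructions node
instance (graph : List (String × List String)) (instructions : String) (node : String) (out : Int × Int) : Decidable (Spec_find_repeat_length graph instructions node out) := by unfold Spec_find_repeat_length; infer_instance

-- ===== CLAIM (what is proved, stated in full; the proofs are below) =====
def Claim_equal_find_repeat_length : Prop := ∀ (graph : List (String × List String)) (instructions : String) (node : String), Dom_find_repeat_length graph instructions node → Pre_find_repeat_length graph instructions node → Spec_find_repeat_length graph instructions node (find_repeat_length graph instructions node)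

-- ===== LEMMAS AND PROOFS =====

-- the (total) state sequence both loops traverse: pvPath t = state after t steps
def pvPath (graph : List (String × List String)) (instructions : String) (node : String) :
    Nat → String × Int
  | 0 => (node, 0)
  | t + 1 =>
    py_traverse graph (pvPath graph instructions node t).1 instructions
      (pvPath graph instructions node t).2

-- Bool "state t repeats an earlier state"
def pvRepB (graph : List (String × List String)) (instructions : String) (node : String)
    (t : Nat) : Bool :=
  (List.range t).any (fun i => pvPath graph instructions node i == pvPath graph instructions node t)

lemma pvRepB_iff (graph : List (String × List String)) (instructions : String) (node : String)
    (t : Nat) : pvRepB graph instructions node t = true ↔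
      ∃ i, i < t ∧ pvPath graph instructions node i = pvPath graph instructions node t := by
  simp [pvRepB, List.any_eq_true, List.mem_range]

-- T = first repeat time, i0 = the (unique) earlier index it repeats
def pvT (graph : List (String × List String)) (instructions : String) (node : String)
    (hex : ∃ t, pvRepB graph instructions node t = true) : Nat := Nat.find hex

lemma pvT_spec (graph : List (String × List String)) (instructions : String) (node : String)
    (hex : ∃ t, pvRepB graph instructions node t = true) :
    ∃ i, i < pvT graph instructions node hex ∧
      pvPath graph instructions node i = pvPath graph instructions node (pvT graph instructions node hex) :=
  (pvRepB_iff _ _ _ _).mp (Nat.find_spec hex)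

def pvI0 (graph : List (String × List String)) (instructions : String) (node : String)
    (hex : ∃ t, pvRepB graph instructions node t = true) : Nat :=
  Nat.find (pvT_spec graph instructions node hex)

lemma pvT_pos (graph : List (String × List String)) (instructions : String) (node : String)
    (hex : ∃ t, pvRepB graph instructions node t = true) : 0 < pvT graph instructions node hex := by
  rcases Nat.eq_zero_or_pos (pvT graph instructions node hex) with h | h
  · exfalso; rcases pvT_spec graph instructions node hex with ⟨i, hi, _⟩; omega
  · exact h

lemma pvPath_ne (graph : List (String × List String)) (instructions : String) (node : String)
    (hex : ∃ t, pvRepB graph instructions node t = true) {i j : Nat} (hij : i < j)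
    (hj : j < pvT graph instructions node hex) :
    pvPath graph instructions node i ≠ pvPath graph instructions node j := by
  intro h
  exact (Nat.find_min hex hj) ((pvRepB_iff _ _ _ _).mpr ⟨i, hij, h⟩)

lemma pvI0_lt (graph : List (String × List String)) (instructions : String) (node : String)
    (hex : ∃ t, pvRepB graph instructions node t = true) :
    pvI0 graph instructions node hex < pvT graph instructions node hex :=
  (Nat.find_spec (pvT_spec graph instructions node hex)).1

lemma pvI0_eq (graph : List (String × List String)) (instructions : String) (node : String)
    (hex : ∃ t, pvRepB graph instructions node t = true) :
    pvPath graph instructions node (pvI0 graph instructions node hex) =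
      pvPath graph instructions node (pvT graph instructions node hex) :=
  (Nat.find_spec (pvT_spec graph instructions node hex)).2

lemma pvI0_min (graph : List (String × List String)) (instructions : String) (node : String)
    (hex : ∃ t, pvRepB graph instructions node t = true) {j : Nat}
    (hj : j < pvI0 graph instructions node hex) :
    pvPath graph instructions node j ≠ pvPath graph instructions node (pvT graph instructions node hex) := by
  intro h
  exact Nat.find_min (pvT_spec graph instructions node hex) hj
    ⟨Nat.lt_trans hj (pvI0_lt graph instructions node hex), h⟩

-- first-match lookup in the assoc list graph, for a present key
lemma get?_mk_of_mem {l : List (String × List String)} {k : String}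
    (h : k ∈ l.map Prod.fst) :
    ∃ v, PySem.Dict.get? ⟨l⟩ k = some v ∧ (k, v) ∈ l := by
  induction l with
  | nil => simp at h
  | cons p rest ih =>
    rcases p with ⟨k', v'⟩
    rw [PySem.Dict.get?_mk_cons]
    by_cases hk : k' = k
    · subst hk; exact ⟨v', by simp, by simp⟩
    · simp only [List.map_cons, List.mem_cons] at h
      rcases h with h | h
      · exact absurd h.symm hk
      · rcases ih h with ⟨v, hv, hm⟩
        exact ⟨v, by simp [hk, hv], List.mem_cons_of_mem _ hm⟩

-- under Pre_, every state on the path has a key node and an index in [0, |instructions|)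
lemma pvPath_mem (graph : List (String × List String)) (instructions : String) (node : String)
    (hpre : Pre_find_repeat_length graph instructions node) (t : Nat) :
    (pvPath graph instructions node t).1 ∈ graph.map Prod.fst ∧
      0 ≤ (pvPath graph instructions node t).2 ∧
      (pvPath graph instructions node t).2 < PySem.Str.len instructions := by
  obtain ⟨hne, hnode, hclosed⟩ := hpre
  have hL : 0 < PySem.Str.len instructions := by
    have h1 : instructions.length ≠ 0 := by simpa using hne
    simp [PySem.Str.len_eq]; omega
  induction t with
  | zero => exact ⟨hnode, le_refl _, hL⟩
  | succ t ih =>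
    obtain ⟨hk, _, _⟩ := ih
    rcases get?_mk_of_mem hk with ⟨adj, hadj, hmem⟩
    obtain ⟨hlen0, hall0⟩ := hclosed _ hmem
    have hlen : 2 ≤ adj.length := hlen0
    have hall : ∀ a ∈ adj, a ∈ graph.map Prod.fst := hall0
    constructor
    · show (py_traverse graph (pvPath graph instructions node t).1 instructions
        (pvPath graph instructions node t).2).1 ∈ _
      simp only [py_traverse, hadj, Option.getD_some]
      split
      · have h0 : PySem.List.pyGet? adj 0 = some adj[0] := by
          rw [PySem.List.pyGet?_zero]
          simp [List.getElem?_eq_getElem (by omega : 0 < adj.length)]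
        rw [h0]; exact hall _ (by simp [List.getElem_mem])
      · have h1 : PySem.List.pyGet? adj 1 = some adj[1] := by
          have := PySem.List.pyGet?_ofNat adj 1 (by omega)
          simpa using this
        rw [h1]; exact hall _ (by simp [List.getElem_mem])
    · exact ⟨PySem.Int.mod_nonneg _ hL, PySem.Int.mod_lt _ hL⟩

-- pigeonhole: some state repeats within graph.length * |instructions| steps
lemma pvRep_exists_le (graph : List (String × List String)) (instructions : String) (node : String)
    (hpre : Pre_find_repeat_length graph instructions node) :
    ∃ t, t ≤ graph.length * instructions.toList.length ∧ pvRepB graph instructions node t = true := by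
  by_contra hcon
  push Not at hcon
  have hinj : ∀ i j, i ≤ graph.length * instructions.toList.length →
      j ≤ graph.length * instructions.toList.length →
      pvPath graph instructions node i = pvPath graph instructions node j → i = j := by
    intro i j hi hj hEq
    rcases lt_trichotomy i j with h | h | h
    · exact absurd ((pvRepB_iff _ _ _ _).mpr ⟨i, h, hEq⟩) (by simpa using hcon j hj)
    · exact h
    · exact absurd ((pvRepB_iff _ _ _ _).mpr ⟨j, h, hEq.symm⟩) (by simpa using hcon i hi)
  have hmaps : ∀ t : Nat, pvPath graph instructions node t ∈
      (graph.map Prod.fst).toFinset ×ˢ Finset.Ico (0 : Int) (PySem.Str.len instructions) := by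
    intro t
    rcases pvPath_mem graph instructions node hpre t with ⟨h1, h2, h3⟩
    simp only [Finset.mem_product, Finset.mem_Ico, List.mem_toFinset]
    exact ⟨h1, h2, h3⟩
  have hcard : ((graph.map Prod.fst).toFinset ×ˢ
      Finset.Ico (0 : Int) (PySem.Str.len instructions)).card ≤
      graph.length * instructions.toList.length := by
    rw [Finset.card_product]
    have c1 : (graph.map Prod.fst).toFinset.card ≤ graph.length :=
      le_trans (List.toFinset_card_le _) (by simp)
    have c2 : (Finset.Ico (0 : Int) (PySem.Str.len instructions)).card =
        instructions.toList.length := by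
      rw [Int.card_Ico, sub_zero, PySem.Str.len_eq]
      simp only [String.length_toList, Int.toNat_natCast]
    rw [c2]
    exact Nat.mul_le_mul_right _ c1
  obtain ⟨a, ha, b, hb, hab, heq⟩ :=
    Finset.exists_ne_map_eq_of_card_lt_of_maps_to
      (s := Finset.range (graph.length * instructions.toList.length + 1))
      (t := (graph.map Prod.fst).toFinset ×ˢ Finset.Ico (0 : Int) (PySem.Str.len instructions))
      (f := fun t => pvPath graph instructions node t)
      (by simpa using Nat.lt_succ_of_le hcard) (fun a _ => hmaps a)
  simp only [Finset.mem_range] at ha hb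
  exact hab (hinj a b (by omega) (by omega) heq)

lemma pvRep_exists (graph : List (String × List String)) (instructions : String) (node : String)
    (hpre : Pre_find_repeat_length graph instructions node) :
    ∃ t, pvRepB graph instructions node t = true := by
  rcases pvRep_exists_le graph instructions node hpre with ⟨t, _, h⟩
  exact ⟨t, h⟩

lemma pvT_le (graph : List (String × List String)) (instructions : String) (node : String)
    (hpre : Pre_find_repeat_length graph instructions node)
    (hex : ∃ t, pvRepB graph instructions node t = true) :
    pvT graph instructions node hex ≤ graph.length * instructions.toList.length := by
  rcases pvRep_exists_le graph instructions node hpre with ⟨t, ht, h⟩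
  exact le_trans (Nat.find_min' hex h) ht

-- assoc-list lookup over an index range: no hit / first hit
lemma dict_get_range'_none (q : Nat → String × Int) (k : String × Int) :
    ∀ (n a : Nat), (∀ i, a ≤ i → i < a + n → q i ≠ k) →
      PySem.Dict.get? ⟨(List.range' a n).map (fun i => (q i, (i : Int)))⟩ k = none := by
  intro n
  induction n with
  | zero => intro a _; rfl
  | succ n ih =>
    intro a h
    rw [List.range'_succ, List.map_cons, PySem.Dict.get?_mk_cons]
    have : ¬ (q a == k) = true := by
      simp only [beq_iff_eq]; exact h a le_rfl (by omega)
    simp only [this, Bool.false_eq_true, if_false]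
    exact ih (a + 1) (fun i hi hij => h i (by omega) (by omega))

lemma dict_get_range'_some (q : Nat → String × Int) (k : String × Int) :
    ∀ (n a j : Nat), a ≤ j → j < a + n → q j = k → (∀ i, a ≤ i → i < j → q i ≠ k) →
      PySem.Dict.get? ⟨(List.range' a n).map (fun i => (q i, (i : Int)))⟩ k = some (j : Int) := by
  intro n
  induction n with
  | zero => intro a j h1 h2; omega
  | succ n ih =>
    intro a j h1 h2 hq hmin
    rw [List.range'_succ, List.map_cons, PySem.Dict.get?_mk_cons]
    by_cases hja : j = a
    · subst hja; simp [hq]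
    · have hne : ¬ (q a == k) = true := by
        simp only [beq_iff_eq]; exact hmin a le_rfl (by omega)
      simp only [hne, Bool.false_eq_true, if_false]
      exact ih (a + 1) j (by omega) (by omega) hq (fun i hi hij => hmin i (by omega) hij)

lemma find?_range'_some (p : Nat → Bool) :
    ∀ (n a j : Nat), a ≤ j → j < a + n → p j = true → (∀ i, a ≤ i → i < j → p i = false) →
      (List.range' a n).find? p = some j := by
  intro n
  induction n with
  | zero => intro a j h1 h2; omega
  | succ n ih =>
    intro a j h1 h2 hp hmin
    rw [List.range'_succ, List.find?_cons]
    by_cases hja : j = a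
    · subst hja; simp [hp]
    · have hne : p a = false := hmin a le_rfl (by omega)
      simp only [hne]
      exact ih (a + 1) j (by omega) (by omega) hp (fun i hi hij => hmin i (by omega) hij)

-- two PySem.Dicts with the same items are equal
lemma dict_eq_of_items {κ ν : Type} [BEq κ] {d e : PySem.Dict κ ν}
    (h : PySem.Dict.items d = PySem.Dict.items e) : d = e := by
  cases d; cases e; simpa using h

-- A's loop, started at step t on the path with the dict of the first t+1 states,
-- returns (T - i0, T)
lemma py_loop_eq (graph : List (String × List String)) (instructions : String) (node : String)
    (hex : ∃ t, pvRepB graph instructions node t = true) :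
    ∀ (fuel t : Nat), t < pvT graph instructions node hex →
      pvT graph instructions node hex ≤ t + fuel →
      py_loop graph instructions fuel
          ⟨(List.range (t + 1)).map (fun i => (pvPath graph instructions node i, (i : Int)))⟩
          (t : Int) (pvPath graph instructions node t).1 (pvPath graph instructions node t).2 =
        ((pvT graph instructions node hex : Int) - (pvI0 graph instructions node hex : Int),
          (pvT graph instructions node hex : Int)) := by
  intro fuel
  induction fuel with
  | zero => intro t h1 h2; omega
  | succ fuel ih =>
    intro t h1 h2
    rw [py_loop]
    have hstep : py_traverse graph (pvPath graph instructions node t).1 instructions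
        (pvPath graph instructions node t).2 = pvPath graph instructions node (t + 1) := rfl
    have hi0 := pvI0_lt graph instructions node hex
    by_cases hT : t + 1 = pvT graph instructions node hex
    · have hget : PySem.Dict.get?
          (⟨(List.range (t + 1)).map (fun i => (pvPath graph instructions node i, (i : Int)))⟩ :
            PySem.Dict (String × Int) Int) (pvPath graph instructions node (t + 1)) =
          some ((pvI0 graph instructions node hex : Nat) : Int) := by
        rw [List.range_eq_range']
        apply dict_get_range'_some _ _ (t + 1) 0 _ (Nat.zero_le _) (by omega)
        · rw [pvI0_eq graph instructions node hex, hT]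
        · intro i _ hij
          rw [hT]
          exact pvI0_min graph instructions node hex hij
      simp only [hstep, hget]
      rw [Prod.mk.injEq]
      constructor <;> omega
    · have hget : PySem.Dict.get?
          (⟨(List.range (t + 1)).map (fun i => (pvPath graph instructions node i, (i : Int)))⟩ :
            PySem.Dict (String × Int) Int) (pvPath graph instructions node (t + 1)) = none := by
        rw [List.range_eq_range']
        apply dict_get_range'_none
        intro i _ hi
        exact pvPath_ne graph instructions node hex (by omega) (by omega)
      simp only [hstep, hget]
      have hcont : PySem.Dict.contains
          (⟨(List.range (t + 1)).map (fun i => (pvPath graph instructions node i, (i : Int)))⟩ :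
            PySem.Dict (String × Int) Int) (pvPath graph instructions node (t + 1)) = false := by
        rw [PySem.Dict.contains_eq_isSome_get?, hget]; rfl
      have hins : (⟨(List.range (t + 1)).map (fun i => (pvPath graph instructions node i, (i : Int)))⟩ :
            PySem.Dict (String × Int) Int).insert (pvPath graph instructions node (t + 1))
            ((t : Int) + 1) =
          ⟨(List.range (t + 2)).map (fun i => (pvPath graph instructions node i, (i : Int)))⟩ := by
        apply dict_eq_of_items
        rw [PySem.Dict.items_insert_of_not_contains _ _ hcont]
        show _ ++ _ = (List.range (t + 2)).map _
        push_cast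
        simp [List.range_succ]
      rw [hins]
      have := ih (t + 1) (by omega) (by omega)
      push_cast at this ⊢
      exact this

lemma alt_walk_eq (graph : List (String × List String)) (instructions : String) (node : String)
    (t : Nat) :
    alt_walk graph instructions (PySem.Str.len instructions) node t =
      pvPath graph instructions node t := by
  induction t with
  | zero => rfl
  | succ t ih => rw [alt_walk, ih]; rfl

lemma alt_outer_eq (graph : List (String × List String)) (instructions : String) (node : String)
    (hex : ∃ t, pvRepB graph instructions node t = true) :
    ∀ (fuel t : Nat), 0 < t → t ≤ pvT graph instructions node hex →
      pvT graph instructions node hex < t + fuel →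
      alt_outer graph instructions (PySem.Str.len instructions) node fuel t =
        ((pvT graph instructions node hex : Int) - (pvI0 graph instructions node hex : Int),
          (pvT graph instructions node hex : Int)) := by
  intro fuel
  induction fuel with
  | zero => intro t h1 h2 h3; omega
  | succ fuel ih =>
    intro t h1 h2 h3
    rw [alt_outer]
    have hi0 := pvI0_lt graph instructions node hex
    by_cases hT : t = pvT graph instructions node hex
    · have hfind : (List.range t).find? (fun i =>
          alt_walk graph instructions (PySem.Str.len instructions) node i ==
            alt_walk graph instructions (PySem.Str.len instructions) node t) =
          some (pvI0 graph instructions node hex) := by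
        rw [List.range_eq_range']
        apply find?_range'_some _ t 0 _ (Nat.zero_le _) (by omega)
        · simp only [alt_walk_eq, beq_iff_eq, hT]
          exact pvI0_eq graph instructions node hex
        · intro i _ hij
          simp only [alt_walk_eq, hT]
          simpa using pvI0_min graph instructions node hex hij
      simp only [hfind]
      rw [hT]
    · have hlt : t < pvT graph instructions node hex := by omega
      have hrep : pvRepB graph instructions node t = false :=
        Bool.eq_false_iff.mpr (Nat.find_min hex hlt)
      have hfind : (List.range t).find? (fun i =>
          alt_walk graph instructions (PySem.Str.len instructions) node i ==
            alt_walk graph instructions (PySem.Str.len instructions) node t) = none := by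
        apply List.find?_eq_none.mpr
        intro i hi
        simp only [List.mem_range] at hi
        simp only [alt_walk_eq, beq_iff_eq]
        exact pvPath_ne graph instructions node hex hi hlt
      simp only [hfind]
      exact ih (t + 1) (by omega) (by omega) (by omega)

-- ===== VERDICT (by name: the statement is the Claim_ definition above) =====
theorem find_repeat_length_spec : Claim_equal_find_repeat_length := by
  intro graph instructions node _ hpre
  show find_repeat_length graph instructions node = find_repeat_length_alt graph instructions node
  have hex := pvRep_exists graph instructions node hpre
  have hT := pvT_le graph instructions node hpre hex
  have hpos := pvT_pos graph instructions node hex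
  have hA : find_repeat_length graph instructions node =
      ((pvT graph instructions node hex : Int) - (pvI0 graph instructions node hex : Int),
        (pvT graph instructions node hex : Int)) := by
    have h0 := py_loop_eq graph instructions node hex
      (graph.length * instructions.toList.length + 1) 0 hpos (by omega)
    simpa [find_repeat_length, List.range_one, pvPath] using h0
  have hB : find_repeat_length_alt graph instructions node =
      ((pvT graph instructions node hex : Int) - (pvI0 graph instructions node hex : Int),
        (pvT graph instructions node hex : Int)) := by
    exact alt_outer_eq graph instructions node hex
      (graph.length * instructions.toList.length + 1) 1 (by omega) hpos (by omega)
  rw [hA, hB]
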